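-- pv_equiv track=rewrite | github.com/YacineCC/UNI | L2/I43/V/TP3/ex4.py | distfreqtrimax
-- ===== SOURCE A (Python) =====
-- def trigrammes(texte):
-- 	big = []
-- 	i = 0
-- 	while(i < len(texte)-2):
-- 		ch = ""
-- 		for k in range (3):
-- 			ch += texte[i+k]
-- 		big += [ch]
-- 		i += 1
-- 	return big
--
-- def freqtri(texte):
-- 	big = trigrammes(texte)
-- 	freq = {}
-- 	for i in range(len(big)):
-- 		freq[big[i]] = 0
--
-- 	freqtrimaxi = freq[big[0]]
-- 	trimaxi = big[0]
--
-- 	for j in range(len(big)):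
-- 		if(big[j] in freq.keys()):
-- 			freq[big[j]] += 1
-- 			if freq[big[j]] > freqtrimaxi:
-- 				freqtrimaxi = freq[big[j]]
-- 				trimaxi = big[j]
--
-- 	return trimaxi,freqtrimaxi
--
-- def distfreqtrimax(texte):
-- 	tab = []
-- 	trimaxi = freqtri(texte)[0]
-- 	big = trigrammes(texte)
-- 	i = 0
-- 	k = 0
--     #on cherche d'abord la premiere occurence du trigramme maximal
-- 	while(big[i] != trimaxi):
-- 		i += 1
-- 	#puis on incremente k et on le rentre dans le tab de sorti et on remet k a 0
-- 	while(i < len(big)):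
-- 		if(big[i] == trimaxi):
-- 			tab += [k]
-- 			k = 0
-- 		k += 1
-- 		i += 1
--
-- 	return tab
-- ===== SOURCE B (Python) =====
-- def distfreqtrimax(texte):
--     # one pass: positions of each trigram, then pick the max-count trigram whose
--     # M-th occurrence comes first (A's "first to reach the max" tie-break)
--     pos = {}
--     for i in range(len(texte) - 2):
--         pos.setdefault(texte[i:i+3], []).append(i)
--     M = max(len(p) for p in pos.values())
--     best = min((p for p in pos.values() if len(p) == M), key=lambda p: p[M - 1])
--     return [0] + [b - a for a, b in zip(best, best[1:])]
-- ===== Notes on version B (the rewrite author's own statement) =====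
-- stated objective: faster
-- what changed: Instead of building the trigram list twice and running a leader-tracking counting loop plus two scanning while-loops, B makes one pass building a trigram->positions dict, picks among the max-count trigrams the one whose M-th occurrence is earliest (A's first-to-reach-the-max tie-break), and returns [0] plus consecutive position differences.
import Mathlib
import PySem

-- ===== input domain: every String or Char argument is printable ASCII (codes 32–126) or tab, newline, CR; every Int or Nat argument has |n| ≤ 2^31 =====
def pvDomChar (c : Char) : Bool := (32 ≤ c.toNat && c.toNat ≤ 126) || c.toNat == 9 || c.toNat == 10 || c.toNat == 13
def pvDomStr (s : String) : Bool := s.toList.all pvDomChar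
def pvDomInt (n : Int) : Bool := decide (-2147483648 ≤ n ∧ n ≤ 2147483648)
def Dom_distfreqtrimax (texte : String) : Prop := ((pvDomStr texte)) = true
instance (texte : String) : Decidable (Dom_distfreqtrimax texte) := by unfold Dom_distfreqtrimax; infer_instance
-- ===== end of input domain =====

-- B replaces A's trigram-list + leader-tracking count loop + two scanning while-loops by one
-- pass building a trigram→positions dict, then an argmin over the max-count trigrams; equal on
-- texts of length ≥ 3 (shorter texts: A raises IndexError, B raises ValueError).

-- ===== PORT A =====
-- trigrammes: the inner  for k in range(3): ch += texte[i+k]  (when the outer loop runs, i+k is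
-- always in range, so the .getD default is never read)
def pvTriAt (cs : List Char) (i : Int) : List Char :=
  (PySem.List.pyRange 0 3 1).foldl
    (fun ch k => ch ++ (((PySem.List.pyGet? cs (i + k)).map (fun c => [c])).getD [])) []

-- while(i < len(texte)-2): … big += [ch]; i += 1
def pvTrigrammes (cs : List Char) : List (List Char) :=
  (PySem.List.pyRange 0 ((cs.length : Int) - 2) 1).foldl (fun big i => big ++ [pvTriAt cs i]) []

-- body of freqtri's counting loop; freq[big[j]] += 1 runs only under the contains check, where
-- modify with default 0 is exact
def pvStepA (st : PySem.Dict (List Char) Int × Int × List Char) (bj : List Char) :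
    PySem.Dict (List Char) Int × Int × List Char :=
  if st.1.keys.contains bj then
    let d := st.1.modify bj 0 (fun v => v + 1)
    if d.getD bj 0 > st.2.1 then (d, d.getD bj 0, bj) else (d, st.2.1, st.2.2)
  else st

-- freqtri; 'freq[big[0]]' raises IndexError on big = [] (texts shorter than 3 characters): those
-- inputs are outside Pre_, the ([], 0) branch stands for the raise
def pvFreqtri (cs : List Char) : List Char × Int :=
  let big := pvTrigrammes cs
  let freq : PySem.Dict (List Char) Int :=
    (PySem.List.pyRange 0 (big.length : Int) 1).foldl
      (fun d i => d.insert (PySem.List.pyGetD big i []) 0) PySem.Dict.empty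
  match PySem.List.pyGet? big 0 with
  | none => ([], 0)
  | some b0 =>
    let st :=
      (PySem.List.pyRange 0 (big.length : Int) 1).foldl
        (fun st j => pvStepA st (PySem.List.pyGetD big j [])) (freq, freq.getD b0 0, b0)
    (st.2.2, st.2.1)

-- while(big[i] != trimaxi): i += 1  — fuel-bounded transcription (fuel = len(big)); under Pre_ the
-- trigram trimaxi occurs in big, so the loop exits before the fuel runs out
def pvFindIdx (big : List (List Char)) (t : List Char) : Nat → Nat → Nat
  | i, 0 => i
  | i, fuel + 1 =>
    if PySem.List.pyGetD big (i : Int) [] ≠ t then pvFindIdx big t (i + 1) fuel else i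

-- while(i < len(big)): if big[i] == trimaxi: tab += [k]; k = 0 … k += 1; i += 1
def pvGapLoop (big : List (List Char)) (t : List Char) (i : Nat) (k : Int) (tab : List Int) :
    List Int :=
  if h : i < big.length then
    if PySem.List.pyGetD big (i : Int) [] = t then
      pvGapLoop big t (i + 1) (0 + 1) (tab ++ [k])
    else pvGapLoop big t (i + 1) (k + 1) tab
  else tab
termination_by big.length - i

def distfreqtrimax (texte : String) : List Int :=
  let cs := texte.toList
  let trimaxi := (pvFreqtri cs).1
  let big := pvTrigrammes cs
  let i := pvFindIdx big trimaxi 0 big.length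
  pvGapLoop big trimaxi i 0 []

-- ===== PORT B =====
-- pos.setdefault(texte[i:i+3], []).append(i)  ==  modify key [] (· ++ [i])
def pvPosDict (cs : List Char) : PySem.Dict (List Char) (List Int) :=
  (PySem.List.pyRange 0 ((cs.length : Int) - 2) 1).foldl
    (fun d i => d.modify (PySem.List.slice cs (some i) (some (i + 3))) [] (fun l => l ++ [i]))
    PySem.Dict.empty

-- max(len(p) for p in pos.values()); min((p … if len(p)==M), key=lambda p: p[M-1]); the .getD
-- defaults stand for Python's ValueError/IndexError, which cannot fire under Pre_ (pos is
-- nonempty and every p kept by the filter has length M ≥ 1)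
def distfreqtrimax_alt (texte : String) : List Int :=
  let cs := texte.toList
  let pos := pvPosDict cs
  let M : Int := (PySem.List.max? (pos.values.map (fun p => (p.length : Int))) (fun x => x)).getD 0
  let best : List Int :=
    (PySem.List.min? (pos.values.filter (fun p => (p.length : Int) == M))
      (fun p => (PySem.List.pyGet? p (M - 1)).getD 0)).getD []
  [0] ++ (best.zip (PySem.List.slice best (some 1) none)).map (fun ab => ab.2 - ab.1)

-- ===== PRECONDITION & SPEC =====
-- texts shorter than 3 characters have no trigram: A raises IndexError there (and B ValueError)
def Pre_distfreqtrimax (texte : String) : Prop := 3 ≤ texte.toList.length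
instance (texte : String) : Decidable (Pre_distfreqtrimax texte) := by
  unfold Pre_distfreqtrimax; infer_instance
def pvWitness_distfreqtrimax : String := "abcab"

def Spec_distfreqtrimax (texte : String) (out : List Int) : Prop := out = distfreqtrimax_alt texte
instance (texte : String) (out : List Int) : Decidable (Spec_distfreqtrimax texte out) := by
  unfold Spec_distfreqtrimax; infer_instance

-- ===== CLAIM (what is proved, stated in full; the proofs are below) =====
def Claim_equal_distfreqtrimax : Prop := ∀ (texte : String), Dom_distfreqtrimax texte →
  Pre_distfreqtrimax texte → Spec_distfreqtrimax texte (distfreqtrimax texte)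

-- ===== LEMMAS AND PROOFS =====

-- proof-layer view of both programs: positions (with offset) of t in a list of trigrams
def pvPosFrom (t : List Char) : List (List Char) → Int → List Int
  | [], _ => []
  | y :: ys, a => if y = t then a :: pvPosFrom t ys (a + 1) else pvPosFrom t ys (a + 1)

-- proof-layer view of A's second while-loop
def pvGaps (t : List Char) : List (List Char) → Int → List Int
  | [], _ => []
  | y :: ys, k => if y = t then k :: pvGaps t ys 1 else pvGaps t ys (k + 1)

-- proof-layer view of B's zip expression
def pvDiffs (l : List Int) : List Int := (l.zip l.tail).map (fun ab => ab.2 - ab.1)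

-- invariant of A's counting fold over the processed prefix p
def pvInv (XS : List (List Char)) (x0 : List Char) (p : List (List Char))
    (st : PySem.Dict (List Char) Int × Int × List Char) : Prop :=
  (∀ y, st.1.getD y 0 = (p.count y : Int)) ∧
  (st.1.keys = PySem.Set.ofList XS) ∧
  (∀ y, (p.count y : Int) ≤ st.2.1) ∧
  (p = [] → st.2.1 = 0 ∧ st.2.2 = x0) ∧
  (p ≠ [] → ∃ q r, p = q ++ st.2.2 :: r ∧ (q.count st.2.2 : Int) + 1 = st.2.1 ∧
      ∀ q' y r', p = q' ++ y :: r' → q'.length < q.length → (q'.count y : Int) + 1 < st.2.1)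

theorem pvPosFrom_append (t : List Char) (l r : List (List Char)) (a : Int) :
    pvPosFrom t (l ++ r) a = pvPosFrom t l a ++ pvPosFrom t r (a + l.length) := by
  induction l generalizing a with
  | nil => simp [pvPosFrom]
  | cons y ys ih =>
      simp only [List.cons_append, pvPosFrom, ih, List.length_cons]
      split_ifs with h <;> simp <;> ring_nf

theorem length_pvPosFrom (t : List Char) (s : List (List Char)) (a : Int) :
    (pvPosFrom t s a).length = s.count t := by
  induction s generalizing a with
  | nil => simp [pvPosFrom]
  | cons y ys ih =>
      simp only [pvPosFrom]
      split_ifs with h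
      · simp [h, ih]
      · simp [ih, h]

theorem pvPosFrom_getElem? (t : List Char) (s : List (List Char)) (a : Int) (i : Nat) (j : Int)
    (h : (pvPosFrom t s a)[i]? = some j) :
    ∃ q r, s = q ++ t :: r ∧ j = a + q.length ∧ q.count t = i := by
  induction s generalizing a i with
  | nil => simp [pvPosFrom] at h
  | cons y ys ih =>
      simp only [pvPosFrom] at h
      split_ifs at h with hy
      · subst hy
        match i, h with
        | 0, h =>
            refine ⟨[], ys, by simp, ?_, by simp⟩
            simp at h ⊢; omega
        | i + 1, h =>
            simp only [List.getElem?_cons_succ] at h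
            obtain ⟨q, r, hs, hj, hc⟩ := ih (a + 1) i h
            exact ⟨y :: q, r, by simp [hs], by simp [hj]; omega, by simp [hc]⟩
      · obtain ⟨q, r, hs, hj, hc⟩ := ih (a + 1) i h
        have hne : y ≠ t := hy
        exact ⟨y :: q, r, by simp [hs], by simp [hj]; omega,
          by rw [List.count_cons_of_ne hne, hc]⟩

theorem pvPosFrom_getElem?_of_split (t : List Char) (q r : List (List Char)) (a : Int) :
    (pvPosFrom t (q ++ t :: r) a)[q.count t]? = some (a + q.length) := by
  induction q generalizing a with
  | nil => simp [pvPosFrom]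
  | cons y ys ih =>
      simp only [List.cons_append, pvPosFrom]
      split_ifs with hy
      · subst hy
        simp only [List.count_cons_self, List.getElem?_cons_succ]
        have := ih (a + 1)
        rw [this]
        congr 1; simp; ring
      · have hne : y ≠ t := hy
        rw [List.count_cons_of_ne hne, ih (a + 1)]
        congr 1; simp; ring

theorem pvGaps_eq (t : List Char) (s : List (List Char)) (a k : Int) :
    pvGaps t s k = match pvPosFrom t s a with
      | [] => []
      | q :: qs => (k + (q - a)) :: pvDiffs (q :: qs) := by
  induction s generalizing a k with
  | nil => simp [pvGaps, pvPosFrom]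
  | cons y ys ih =>
      simp only [pvGaps, pvPosFrom]
      split_ifs with hy
      · rw [ih (a + 1) 1]
        rcases hP : pvPosFrom t ys (a + 1) with _ | ⟨q, qs⟩
        · simp [pvDiffs]
        · show k :: ((1 : Int) + (q - (a + 1))) :: pvDiffs (q :: qs)
            = (k + (a - a)) :: pvDiffs (a :: q :: qs)
          simp only [pvDiffs, List.tail_cons, List.zip_cons_cons, List.map_cons]
          rw [show k + (a - a) = k from by ring,
            show (1 : Int) + (q - (a + 1)) = q - a from by ring]
      · rw [ih (a + 1) (k + 1)]
        rcases hP : pvPosFrom t ys (a + 1) with _ | ⟨q, qs⟩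
        · rfl
        · show (k + 1 + (q - (a + 1))) :: pvDiffs (q :: qs) = (k + (q - a)) :: pvDiffs (q :: qs)
          rw [show k + 1 + (q - (a + 1)) = k + (q - a) from by ring]

theorem pvGapLoop_eq (big : List (List Char)) (t : List Char) (i : Nat) (k : Int)
    (tab : List Int) : pvGapLoop big t i k tab = tab ++ pvGaps t (big.drop i) k := by
  suffices H : ∀ n i k tab, big.length - i = n →
      pvGapLoop big t i k tab = tab ++ pvGaps t (big.drop i) k from H _ i k tab rfl
  intro n
  induction n with
  | zero =>
      intro i k tab h
      rw [pvGapLoop]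
      have hni : ¬ i < big.length := by omega
      have hd : List.drop i big = [] := List.drop_eq_nil_of_le (by omega)
      simp [hni, hd, pvGaps]
  | succ n ih =>
      intro i k tab h
      rw [pvGapLoop]
      by_cases hi : i < big.length
      · have hget : PySem.List.pyGetD big (i : Int) [] = big[i] := by
          rw [PySem.List.pyGetD_natCast]
          exact List.getD_eq_getElem big [] hi
        have hd := List.drop_eq_getElem_cons hi
        rw [dif_pos hi, hget]
        by_cases he : big[i] = t
        · rw [if_pos he, ih (i + 1) (0 + 1) (tab ++ [k]) (by omega), hd]
          simp [pvGaps, he]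
        · rw [if_neg he, ih (i + 1) (k + 1) tab (by omega), hd]
          simp [pvGaps, he]
      · omega

theorem pvFindIdx_eq (big : List (List Char)) (t : List Char) (j0 : Nat)
    (hj : j0 < big.length) (ht : big[j0]? = some t)
    (hmin : ∀ j, j < j0 → big[j]? ≠ some t) :
    ∀ fuel i, i ≤ j0 → j0 < i + fuel → pvFindIdx big t i fuel = j0 := by
  intro fuel
  induction fuel with
  | zero => intro i h1 h2; omega
  | succ fuel ih =>
      intro i h1 h2
      rw [pvFindIdx]
      by_cases hij : i = j0
      · subst hij
        have hget : PySem.List.pyGetD big (i : Int) [] = t := by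
          rw [PySem.List.pyGetD_natCast, List.getD_eq_getElem big [] hj]
          have := ht
          rwa [List.getElem?_eq_getElem hj, Option.some_inj] at this
        simp [hget]
      · have hlt : i < j0 := by omega
        have hi : i < big.length := by omega
        have hne : PySem.List.pyGetD big (i : Int) [] ≠ t := by
          rw [PySem.List.pyGetD_natCast, List.getD_eq_getElem big [] hi]
          intro he
          exact hmin i hlt (by rw [List.getElem?_eq_getElem hi, he])
        rw [if_pos hne]
        exact ih (i + 1) (by omega) (by omega)

theorem pvGetD_zero_foldl_insert (l : List (List Char)) (d : PySem.Dict (List Char) Int)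
    (h : ∀ y, d.getD y 0 = 0) (y : List Char) :
    (l.foldl (fun d x => d.insert x (0 : Int)) d).getD y 0 = 0 := by
  induction l generalizing d with
  | nil => exact h y
  | cons x xs ih =>
      refine ih _ (fun z => ?_) 
      rw [PySem.Dict.getD_insert]
      split_ifs with hz
      · rfl
      · exact h z

theorem pvSplit_shorten' {p q' r' : List (List Char)} {x y : List Char}
    (hsplit : p ++ [x] = q' ++ y :: r') (hlen : q'.length < p.length) :
    p = q' ++ y :: p.drop (q'.length + 1) := by
  have ht : p.take q'.length = q' := by
    have h1 := congrArg (List.take q'.length) hsplit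
    rwa [List.take_append_of_le_length (le_of_lt hlen), List.take_left] at h1
  have hd := List.drop_eq_getElem_cons hlen
  have hp : p = q' ++ p[q'.length] :: p.drop (q'.length + 1) := by
    conv_lhs => rw [← List.take_append_drop q'.length p, ht, hd]
  have hy : p[q'.length] = y := by
    have h2 : (q' ++ p[q'.length] :: p.drop (q'.length + 1)) ++ [x] = q' ++ y :: r' := by
      rw [← hp]; exact hsplit
    simp only [List.append_assoc, List.cons_append, List.append_cancel_left_eq] at h2
    exact (List.cons_eq_cons.mp h2).1
  rw [← hy]; exact hp

theorem pvInv_step (XS : List (List Char)) (x0 : List Char) (p : List (List Char))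
    (st : PySem.Dict (List Char) Int × Int × List Char) (x : List Char)
    (hx : x ∈ XS) (h : pvInv XS x0 p st) : pvInv XS x0 (p ++ [x]) (pvStepA st x) := by
  obtain ⟨d, m, t⟩ := st
  obtain ⟨hcnt, hkeys, hmax, hnil, hlead⟩ := h
  simp only at hcnt hkeys hmax hnil hlead
  have hxk : x ∈ d.keys := by rw [hkeys]; exact (PySem.Set.mem_ofList XS x).mpr hx
  have hcontains : d.keys.contains x = true := by
    simpa using hxk
  unfold pvStepA
  simp only [hcontains, if_true]
  have hgetx : (d.modify x 0 (fun v => v + 1)).getD x 0 = (p.count x : Int) + 1 := by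
    rw [PySem.Dict.getD_modify_self, hcnt]
  have hcy : ∀ y, y ≠ x → ((p ++ [x]).count y : Int) = (p.count y : Int) := by
    intro y hyx
    rw [List.count_append, List.count_singleton]
    have : ¬ x = y := fun he => hyx he.symm
    simp [this]
  have hget' : ∀ y, (d.modify x 0 (fun v => v + 1)).getD y 0 = (((p ++ [x]).count y : Int)) := by
    intro y
    by_cases hyx : y = x
    · subst hyx; rw [hgetx, List.count_append]; push_cast; simp
    · rw [PySem.Dict.getD_modify_of_ne d 0 _ hyx, hcnt, hcy y hyx]
  have hkeys' : (d.modify x 0 (fun v => v + 1)).keys = PySem.Set.ofList XS := by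
    rw [PySem.Dict.keys_modify, PySem.Dict.keys_insert_of_contains _ _
      ((PySem.Dict.contains_iff_mem_keys _ _).mpr hxk), hkeys]
  have hcx1 : ((p ++ [x]).count x : Int) = (p.count x : Int) + 1 := by
    rw [List.count_append]; push_cast; simp
  by_cases hc : (d.modify x 0 (fun v => v + 1)).getD x 0 > m
  · rw [if_pos hc]
    rw [hgetx] at hc
    refine ⟨hget', hkeys', ?_, by simp, ?_⟩
    · intro y
      dsimp only
      rw [hgetx]
      by_cases hyx : y = x
      · subst hyx; rw [hcx1]
      · rw [hcy y hyx]; have := hmax y; omega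
    · intro _
      dsimp only
      refine ⟨p, [], by simp, ?_, ?_⟩
      · rw [hgetx]
      · intro q' y r' hsplit hlen
        have hp := pvSplit_shorten' hsplit hlen
        have hsub : (q' ++ [y]).Sublist p := by
          rw [hp]
          exact (List.append_sublist_append_left q').mpr
            (List.cons_sublist_cons.mpr (List.nil_sublist _))
        have hcle : (q'.count y) + 1 ≤ p.count y := by
          have := hsub.count_le y
          simpa [List.count_append] using this
        have := hmax y
        rw [hgetx]
        omega
  · rw [if_neg hc]
    rw [hgetx] at hc
    have hpne : p ≠ [] := by
      intro hpe
      obtain ⟨hm0, -⟩ := hnil hpe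
      subst hpe
      simp at hc
      omega
    obtain ⟨q, r, hsplit, hqc, hmin⟩ := hlead hpne
    refine ⟨hget', hkeys', ?_, by simp, ?_⟩
    · intro y
      dsimp only
      by_cases hyx : y = x
      · subst hyx; rw [hcx1]; omega
      · rw [hcy y hyx]; exact hmax y
    · intro _
      dsimp only
      refine ⟨q, r ++ [x], by rw [hsplit]; simp, hqc, ?_⟩
      intro q' y r' hsp hlen
      have hqlt : q'.length < p.length := by
        have : q.length < p.length := by rw [hsplit]; simp
        omega
      have hp := pvSplit_shorten' hsp hqlt
      exact hmin q' y _ hp hlen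

theorem pvInv_foldl (XS : List (List Char)) (x0 : List Char) :
    ∀ (rest p : List (List Char)) st, (∀ x ∈ rest, x ∈ XS) → pvInv XS x0 p st →
      pvInv XS x0 (p ++ rest) (rest.foldl pvStepA st) := by
  intro rest
  induction rest with
  | nil => intro p st _ h; simpa using h
  | cons x xs ih =>
      intro p st hmem hInv
      have hstep := pvInv_step XS x0 p st x (hmem x (by simp)) hInv
      have := ih (p ++ [x]) (pvStepA st x) (fun y hy => hmem y (by simp [hy])) hstep
      simpa using this

theorem pvTriAt_eq (cs : List Char) (j : Nat) (h : j + 2 < cs.length) :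
    pvTriAt cs (j : Int) = (cs.drop j).take 3 := by
  have h0 : j < cs.length := by omega
  have h1 : j + 1 < cs.length := by omega
  have e : PySem.List.pyRange 0 3 1 = [0, 1, 2] := by decide
  unfold pvTriAt
  rw [e]
  have c0 : (j : Int) + 0 = ((j : Nat) : Int) := by ring
  have c1 : (j : Int) + 1 = (((j + 1 : Nat)) : Int) := by push_cast; ring
  have c2 : (j : Int) + 2 = (((j + 2 : Nat)) : Int) := by push_cast; ring
  simp only [List.foldl, c0, c1, c2, PySem.List.pyGet?_natCast]
  rw [List.getElem?_eq_getElem h0, List.getElem?_eq_getElem h1, List.getElem?_eq_getElem h]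
  simp only [Option.map_some, Option.getD_some, List.nil_append, List.singleton_append]
  apply List.ext_getElem
  · simp; omega
  · intro i hi1 hi2
    have hi3 : i < 3 := by simpa using hi1
    simp only [List.getElem_take, List.getElem_drop]
    interval_cases i <;> simp

theorem pvTrigrammes_eq (cs : List Char) (h : 3 ≤ cs.length) :
    pvTrigrammes cs = (List.range (cs.length - 2)).map (fun j => (cs.drop j).take 3) := by
  unfold pvTrigrammes
  have hc : ((cs.length : Int) - 2) = ((cs.length - 2 : Nat) : Int) := by omega
  rw [hc, PySem.List.pyRange_zero_natCast, List.foldl_map,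
    PySem.List.foldl_append_singleton_eq_map]
  simp only [List.nil_append]
  refine List.map_congr_left ?_
  intro j hj
  simp only [List.mem_range] at hj
  exact pvTriAt_eq cs j (by omega)

theorem pvFilterMap_eq_posFrom (m : Nat) (g : Nat → List Char) (t : List Char) :
    (((List.range m).map (fun j => (g j, (j : Int)))).filter (fun p => p.1 == t)).map (fun x => x.2)
      = pvPosFrom t ((List.range m).map g) 0 := by
  induction m with
  | zero => simp [pvPosFrom]
  | succ m ih =>
      rw [List.range_succ]
      simp only [List.map_append, List.filter_append]
      rw [ih, pvPosFrom_append]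
      congr 1
      by_cases hg : g m = t <;>
        simp [pvPosFrom, hg]

theorem pvSliceKey (cs : List Char) (j : Nat) :
    PySem.List.slice cs (some (j : Int)) (some ((j : Int) + 3)) = (cs.drop j).take 3 := by
  have c3 : ((j : Int) + 3) = ((j + 3 : Nat) : Int) := by push_cast; ring
  rw [c3, PySem.List.slice_natCast]
  congr 1
  omega

theorem pvPosDict_getD (cs : List Char) (h : 3 ≤ cs.length) (t : List Char) :
    (pvPosDict cs).getD t [] = pvPosFrom t (pvTrigrammes cs) 0 := by
  unfold pvPosDict
  have hc : ((cs.length : Int) - 2) = ((cs.length - 2 : Nat) : Int) := by omega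
  have hstep : (List.range (cs.length - 2)).foldl
      (fun d (j : Nat) => d.modify (PySem.List.slice cs (some (j : Int)) (some ((j : Int) + 3)))
        [] (fun l => l ++ [(j : Int)])) PySem.Dict.empty
      = ((List.range (cs.length - 2)).map (fun j => ((cs.drop j).take 3, (j : Int)))).foldl
        (fun d p => d.modify p.1 [] (fun l => l ++ [p.2])) PySem.Dict.empty := by
    rw [List.foldl_map]
    refine PySem.List.foldl_congr_mem _ _ _ _ ?_
    intro acc x hx
    simp only [List.mem_range] at hx
    simp only []
    rw [pvSliceKey cs x]
  rw [hc, PySem.List.pyRange_zero_natCast, List.foldl_map, hstep,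
    PySem.Dict.getD_foldl_modify_append, pvFilterMap_eq_posFrom, pvTrigrammes_eq cs h]
  simp

theorem pvPosDict_keys (cs : List Char) (h : 3 ≤ cs.length) :
    (pvPosDict cs).keys = PySem.Set.ofList (pvTrigrammes cs) := by
  unfold pvPosDict
  rw [PySem.Dict.keys_foldl_modify_key _ (fun i => PySem.List.slice cs (some i) (some (i + 3)))
      [] (fun _ i l => l ++ [i])]
  have hc : ((cs.length : Int) - 2) = ((cs.length - 2 : Nat) : Int) := by omega
  rw [hc, PySem.List.pyRange_zero_natCast, List.map_map]
  have : (List.map ((fun i => PySem.List.slice cs (some i) (some (i + 3))) ∘ fun k : Nat => (k : Int))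
      (List.range (cs.length - 2))) = pvTrigrammes cs := by
    rw [pvTrigrammes_eq cs h]
    refine List.map_congr_left ?_
    intro j hj
    simp only [List.mem_range] at hj
    simp only [Function.comp]
    exact pvSliceKey cs j
  rw [this]
  simp [PySem.Set.update_nil_left]

theorem pvPosDict_keys_nodup (cs : List Char) : (pvPosDict cs).keys.Nodup := by
  unfold pvPosDict
  exact PySem.Dict.nodup_keys_foldl_modify_key _ _ _ _ _ (by simp)

-- ===== VERDICT (by name: the statement is the Claim_ definition above) =====
-- big.count t is the maximum count m, via the invariant's split witness
theorem pvCount_eq_max (big q r : List (List Char)) (t : List Char) (m : Int)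
    (hsplit : big = q ++ t :: r) (hqc : (q.count t : Int) + 1 = m)
    (hmax : ∀ y, (big.count y : Int) ≤ m) : (big.count t : Int) = m := by
  have hsub : (q ++ [t]).Sublist big := by
    rw [hsplit]
    exact (List.append_sublist_append_left q).mpr
      (List.cons_sublist_cons.mpr (List.nil_sublist _))
  have h1 := hsub.count_le t
  have h2 := hmax t
  simp [List.count_append] at h1
  omega

theorem distfreqtrimax_spec : Claim_equal_distfreqtrimax := by
  intro texte _ hpre
  unfold Pre_distfreqtrimax at hpre
  unfold Spec_distfreqtrimax
  unfold distfreqtrimax distfreqtrimax_alt pvFreqtri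
  dsimp only
  set cs := texte.toList with hcs
  set big := pvTrigrammes cs with hbigdef
  have hbig : big = (List.range (cs.length - 2)).map (fun j => (cs.drop j).take 3) :=
    pvTrigrammes_eq cs hpre
  have hbiglen : big.length = cs.length - 2 := by rw [hbig]; simp
  have hbigne : big ≠ [] := by
    intro he
    rw [he] at hbiglen
    simp at hbiglen
    omega
  -- big[0]
  have h0lt : 0 < big.length := by
    rcases big with _ | _
    · exact absurd rfl hbigne
    · simp
  have hget0 : PySem.List.pyGet? big 0 = some (big[0]'h0lt) := by
    have : ((0 : Nat) : Int) = (0 : Int) := rfl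
    rw [← this, PySem.List.pyGet?_natCast, List.getElem?_eq_getElem h0lt]
  rw [hget0]
  dsimp only
  set b0 := big[0]'h0lt with hb0
  -- the zero-filling loop
  rw [PySem.List.foldl_pyRange_zero_pyGetD' big [] (fun d b => d.insert b (0 : Int))
    PySem.Dict.empty]
  set freq := big.foldl (fun d b => d.insert b (0 : Int)) PySem.Dict.empty with hfreqdef
  have hfreq0 : ∀ y, freq.getD y 0 = 0 :=
    pvGetD_zero_foldl_insert big PySem.Dict.empty (fun y => PySem.Dict.getD_empty y 0)
  have hfreqkeys : freq.keys = PySem.Set.ofList big := by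
    have h := PySem.Dict.keys_foldl_insert big (fun _ _ => (0 : Int)) PySem.Dict.empty
    rw [hfreqdef]
    rw [show (fun (d : PySem.Dict (List Char) Int) (b : List Char) => d.insert b (0 : Int))
      = (fun d b => d.insert b ((fun _ _ => (0 : Int)) d b)) from rfl, h]
    simp [PySem.Set.update_nil_left]
  -- the counting loop
  rw [PySem.List.foldl_pyRange_zero_pyGetD' big [] pvStepA (freq, freq.getD b0 0, b0)]
  rw [hfreq0 b0]
  set st := big.foldl pvStepA (freq, 0, b0) with hstdef
  have hInvBase : pvInv big b0 [] (freq, 0, b0) := by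
    refine ⟨?_, hfreqkeys, ?_, fun _ => ⟨rfl, rfl⟩, fun hne => absurd rfl hne⟩
    · intro y; simpa using hfreq0 y
    · intro y; simp
  have hInv : pvInv big b0 big st := by
    have := pvInv_foldl big b0 big [] (freq, 0, b0) (fun x hx => hx) hInvBase
    simpa using this
  obtain ⟨-, -, hmax, -, hlead⟩ := hInv
  obtain ⟨q, r, hsplit, hqc, hmin⟩ := hlead hbigne
  set t := st.2.2 with htdef
  set m := st.2.1 with hmdef
  have htmem : t ∈ big := by rw [hsplit]; simp
  have hmcount : (big.count t : Int) = m := pvCount_eq_max big q r t m hsplit hqc hmax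
  have hm1 : 1 ≤ m := by omega
  set Mn := big.count t with hMndef
  have hmMn : m = (Mn : Int) := hmcount.symm
  -- B's dict
  have hposkeys : (pvPosDict cs).keys = PySem.Set.ofList big := pvPosDict_keys cs hpre
  have hposnodup : (pvPosDict cs).keys.Nodup := pvPosDict_keys_nodup cs
  have hvals : (pvPosDict cs).values
      = (PySem.Set.ofList big).map (fun k => pvPosFrom k big 0) := by
    rw [PySem.Dict.values_eq_map_keys _ hposnodup [], hposkeys]
    refine List.map_congr_left ?_
    intro k _
    exact pvPosDict_getD cs hpre k
  -- the max
  set L := ((pvPosDict cs).values.map (fun p => (p.length : Int))) with hLdef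
  have hL : L = (PySem.Set.ofList big).map (fun k => (big.count k : Int)) := by
    rw [hLdef, hvals, List.map_map]
    refine List.map_congr_left ?_
    intro k _
    simp [Function.comp, length_pvPosFrom]
  have htset : t ∈ PySem.Set.ofList big := (PySem.Set.mem_ofList big t).mpr htmem
  have hLne : L ≠ [] := by
    rw [hL]
    exact List.ne_nil_of_mem (List.mem_map_of_mem htset)
  obtain ⟨M', hM'⟩ : ∃ M', PySem.List.max? L (fun x => x) = some M' := by
    rcases h : PySem.List.max? L (fun x => x) with _ | M'
    · exact absurd ((PySem.List.max?_eq_none_iff L (fun x => x)).mp h) hLne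
    · exact ⟨M', rfl⟩
  have hMm : M' = m := by
    have hub := PySem.List.max?_isMax hM'
    have hmem := PySem.List.max?_mem hM'
    rw [hL] at hub hmem
    obtain ⟨k0, -, hk0⟩ := List.mem_map.mp hmem
    have h1 : M' ≤ m := by rw [← hk0]; exact hmax k0
    have h2 : m ≤ M' := by
      have := hub (m) (by rw [← hmcount]; exact List.mem_map_of_mem htset)
      exact this
    omega
  rw [hM']
  simp only [Option.getD_some]
  rw [hMm]
  -- the argmin
  set F := ((pvPosDict cs).values.filter (fun p => ((p.length : Int) == m))) with hFdef
  have hposT : (pvPosDict cs).getD t [] = pvPosFrom t big 0 := pvPosDict_getD cs hpre t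
  have hlenT : ((pvPosFrom t big 0).length : Int) = m := by
    rw [length_pvPosFrom]; exact hmcount
  have htF : pvPosFrom t big 0 ∈ F := by
    rw [hFdef]
    refine List.mem_filter.mpr ⟨?_, ?_⟩
    · rw [hvals]; exact List.mem_map_of_mem htset
    · exact beq_iff_eq.mpr hlenT
  obtain ⟨b, hb⟩ : ∃ b, PySem.List.min? F (fun p => (PySem.List.pyGet? p (m - 1)).getD 0)
      = some b := by
    rcases h : PySem.List.min? F (fun p => (PySem.List.pyGet? p (m - 1)).getD 0) with _ | b
    · rw [(PySem.List.min?_eq_none_iff F _).mp h] at htF; simp at htF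
    · exact ⟨b, rfl⟩
  rw [hb]
  simp only [Option.getD_some]
  -- identify b
  have hbmem := PySem.List.min?_mem hb
  rw [hFdef] at hbmem
  obtain ⟨hbvals, hblen⟩ := List.mem_filter.mp hbmem
  obtain ⟨kb, -, hkb⟩ := List.mem_map.mp (hvals ▸ hbvals)
  have hblenN : b.length = Mn := by
    have := beq_iff_eq.mp hblen
    omega
  have hMn1 : 1 ≤ Mn := by omega
  have hidx : m - 1 = ((Mn - 1 : Nat) : Int) := by rw [hmMn]; omega
  have hbidx : Mn - 1 < b.length := by omega
  have hjb' : b[Mn - 1]? = some (b[Mn - 1]'hbidx) := List.getElem?_eq_getElem hbidx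
  set jb := b[Mn - 1]'hbidx with hjbdef
  have hkeyb : (PySem.List.pyGet? b (m - 1)).getD 0 = jb := by
    rw [hidx, PySem.List.pyGet?_natCast, hjb']
    rfl
  rw [← hkb] at hjb'
  obtain ⟨qb, rb, hsplitb, hjb, hcb⟩ := pvPosFrom_getElem? kb big 0 (Mn - 1) jb hjb'
  have hqlen : (pvPosFrom t big 0)[Mn - 1]? = some ((0 : Int) + q.length) := by
    have hqcN : q.count t = Mn - 1 := by omega
    rw [← hqcN, hsplit]
    exact pvPosFrom_getElem?_of_split t q r 0
  have hkeyT : (PySem.List.pyGet? (pvPosFrom t big 0) (m - 1)).getD 0 = (q.length : Int) := by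
    rw [hidx, PySem.List.pyGet?_natCast, hqlen]
    simp
  have hkeyble : (PySem.List.pyGet? b (m - 1)).getD 0
      ≤ (PySem.List.pyGet? (pvPosFrom t big 0) (m - 1)).getD 0 :=
    PySem.List.min?_isMin hb _ htF
  have hqbge : ¬ qb.length < q.length := by
    intro hlt
    have := hmin qb kb rb hsplitb hlt
    omega
  have hqble : (qb.length : Int) ≤ q.length := by
    rw [hkeyb, hkeyT] at hkeyble
    omega
  have hqeqlen : qb.length = q.length := by omega
  have hqeq : qb = q ∧ kb :: rb = t :: r := by
    have h := hsplitb.symm.trans hsplit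
    exact List.append_inj h hqeqlen
  have hkbt : kb = t := (List.cons_eq_cons.mp hqeq.2).1
  have hbT : b = pvPosFrom t big 0 := by rw [← hkb, hkbt]
  -- first occurrence
  have hposne : pvPosFrom t big 0 ≠ [] := by
    intro he
    have := hlenT
    rw [he] at this
    simp at this
    omega
  obtain ⟨j0h, restP, hposcons⟩ := List.exists_cons_of_ne_nil hposne
  obtain ⟨q0, r0, hsplit0, hj0h, hc0⟩ := pvPosFrom_getElem? t big 0 0 j0h
    (by rw [hposcons]; rfl)
  set j0 := q0.length with hj0def
  have hj0lt : j0 < big.length := by rw [hsplit0]; simp [hj0def]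
  have hbigj0 : big[j0]? = some t := by
    rw [hsplit0, List.getElem?_append_right (le_refl q0.length)]
    simp
  have hminj0 : ∀ j, j < j0 → big[j]? ≠ some t := by
    intro j hj he
    have hjq : j < q0.length := hj
    rw [hsplit0, List.getElem?_append_left hjq] at he
    have : t ∈ q0 := List.mem_of_getElem? he
    rw [← List.count_pos_iff] at this
    omega
  have hfind : pvFindIdx big t 0 big.length = j0 :=
    pvFindIdx_eq big t j0 hj0lt hbigj0 hminj0 big.length 0 (by omega) (by omega)
  rw [hfind, pvGapLoop_eq]
  -- drop j0
  have hdrop : big.drop j0 = t :: r0 := by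
    rw [hsplit0, hj0def, List.drop_left]
  have hq0nil : pvPosFrom t q0 0 = [] := by
    have := length_pvPosFrom t q0 0
    rw [hc0] at this
    exact List.eq_nil_of_length_eq_zero this
  have hposfull : pvPosFrom t big 0 = (j0 : Int) :: pvPosFrom t r0 ((j0 : Int) + 1) := by
    rw [hsplit0, pvPosFrom_append, hq0nil, hj0def]
    simp [pvPosFrom]
  rw [pvGaps_eq t (big.drop j0) (j0 : Int) 0, hdrop]
  have hposTT : pvPosFrom t (t :: r0) (j0 : Int)
      = (j0 : Int) :: pvPosFrom t r0 ((j0 : Int) + 1) := by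
    simp [pvPosFrom]
  rw [hposTT]
  simp only [List.nil_append]
  rw [PySem.List.slice_from_one, hbT, hposfull]
  show (0 + ((j0 : Int) - (j0 : Int))) :: pvDiffs ((j0 : Int) :: pvPosFrom t r0 ((j0 : Int) + 1))
    = 0 :: _
  rw [show (0 : Int) + ((j0 : Int) - (j0 : Int)) = 0 from by ring]
  rfl
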